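-- pv_equiv track=rewrite | github.com/pypi-data/pypi-mirror-401 | packages/pyqt-code-editor/pyqt_code_editor-0.0.55.tar.gz/pyqt_code_editor-0.0.55/pyqt_code_editor/utils/languages/python/_auto_indent.py | _is_block_opener
-- ===== SOURCE A (Python) =====
-- BLOCK_KEYWORDS = (
--     "def", "class", "if", "elif", "else", "while",
--     "for", "with", "try", "except", "finally"
-- )
--
-- def _is_block_opener(line: str) -> bool:
--     stripped = line.lstrip()
--     lower_stripped = stripped.lower()
--     for kw in BLOCK_KEYWORDS:
--         if lower_stripped.startswith(kw) and (
--             len(stripped) == len(kw)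
--             or stripped[len(kw)] in (' ', '(', ':')
--         ):
--             return True
--     return False
-- ===== SOURCE B (Python) =====
-- BLOCK_KEYWORDS = (
--     "def", "class", "if", "elif", "else", "while",
--     "for", "with", "try", "except", "finally"
-- )
--
-- _KEYWORD_SET = frozenset(BLOCK_KEYWORDS)
--
--
-- def _is_block_opener(line: str) -> bool:
--     stripped = line.lstrip()
--     # leading token: everything before the first ' ', '(' or ':'
--     token_chars = []
--     for ch in stripped:
--         if ch in (' ', '(', ':'):
--             break
--         token_chars.append(ch)
--     return ''.join(token_chars).lower() in _KEYWORD_SET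
-- ===== Notes on version B (the rewrite author's own statement) =====
-- stated objective: idiomatic
-- what changed: Instead of testing each of the 11 keywords with startswith plus a follow-up separator-character check, B extracts the leading token (the prefix before the first ' ', '(' or ':') in one scan and does a single frozenset membership test.
import Mathlib
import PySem

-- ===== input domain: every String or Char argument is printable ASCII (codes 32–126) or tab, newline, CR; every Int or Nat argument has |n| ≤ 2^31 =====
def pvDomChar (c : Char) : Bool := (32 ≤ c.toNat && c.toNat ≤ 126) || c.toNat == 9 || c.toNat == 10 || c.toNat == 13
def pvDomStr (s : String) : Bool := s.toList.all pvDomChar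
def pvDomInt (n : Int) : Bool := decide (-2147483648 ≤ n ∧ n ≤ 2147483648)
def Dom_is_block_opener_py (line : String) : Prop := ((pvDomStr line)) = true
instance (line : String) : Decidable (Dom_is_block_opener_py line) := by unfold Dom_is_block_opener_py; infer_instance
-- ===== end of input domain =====

-- B replaces the per-keyword startswith loop by extracting the leading token
-- (prefix before the first ' ', '(' or ':') once and testing set membership (idiomatic).


-- ===== PORT A =====
def BLOCK_KEYWORDS : List String :=
  ["def", "class", "if", "elif", "else", "while",
   "for", "with", "try", "except", "finally"]

def is_block_opener_py (line : String) : Bool :=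
  let stripped := PySem.Str.lstrip line
  let lower_stripped := PySem.Str.lower stripped
  -- the for-loop with early return is the usual List.any
  BLOCK_KEYWORDS.any (fun kw =>
    PySem.Str.startswith lower_stripped kw &&
      (PySem.Str.len stripped == PySem.Str.len kw ||
        -- 'stripped[len(kw)] in (' ', '(', ':')'; the index is in range whenever
        -- Python evaluates it (startswith holds and the lengths differ)
        ((PySem.Str.pyGet? stripped (PySem.Str.len kw)).any
          (fun c => c == ' ' || c == '(' || c == ':'))))

-- ===== PORT B =====
def pvKeywordSet : PySem.Set (List Char) :=
  PySem.Set.ofList (BLOCK_KEYWORDS.map String.toList)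

-- the 'for ch in stripped: … break' loop collecting token_chars
def pvToken : List Char → List Char
  | [] => []
  | c :: cs => if c == ' ' || c == '(' || c == ':' then [] else c :: pvToken cs

def is_block_opener_py_alt (line : String) : Bool :=
  let stripped := (PySem.Str.lstrip line).toList
  let token := pvToken stripped
  pvKeywordSet.contains (PySem.Chars.lower token)

-- ===== PRECONDITION & SPEC =====
def Spec_is_block_opener_py (line : String) (out : Bool) : Prop := out = is_block_opener_py_alt line
instance (line : String) (out : Bool) : Decidable (Spec_is_block_opener_py line out) := by unfold Spec_is_block_opener_py; infer_instance

-- ===== CLAIM (what is proved, stated in full; the proofs are below) =====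
def Claim_equal_is_block_opener_py : Prop := ∀ (line : String), Dom_is_block_opener_py line → Spec_is_block_opener_py line (is_block_opener_py line)

-- ===== LEMMAS AND PROOFS =====

def pvSep (c : Char) : Bool := c == ' ' || c == '(' || c == ':'

theorem pvSep_lowerChar (c : Char) : pvSep (PySem.Chars.lowerChar c) = pvSep c := by
  simp only [pvSep, PySem.Chars.lowerChar, PySem.Chars.isupper]
  split_ifs with h
  · simp only [Bool.and_eq_true, decide_eq_true_eq] at h
    have hA : 65 ≤ c.toNat := Char.le_def.mp h.1
    have hZ : c.toNat ≤ 90 := Char.le_def.mp h.2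
    have ht : (Char.ofNat (c.toNat + 32)).toNat = c.toNat + 32 := by
      rw [Char.toNat_ofNat, if_pos]; exact Or.inl (by omega)
    have key : ∀ (x : Char), x.toNat ≠ c.toNat + 32 → ¬ (Char.ofNat (c.toNat + 32) = x) := by
      intro x hx he; exact hx (he ▸ ht)
    have h1 := key ' ' (by simp; omega)
    have h2 := key '(' (by simp; omega)
    have h3 := key ':' (by simp; omega)
    have g1 : ¬ (c = ' ') := fun he => absurd hA (by subst he; decide)
    have g2 : ¬ (c = '(') := fun he => absurd hA (by subst he; decide)
    have g3 : ¬ (c = ':') := fun he => absurd hA (by subst he; decide)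
    rw [show ((Char.ofNat (c.toNat + 32)) == ' ') = false from beq_eq_false_iff_ne.mpr h1,
        show ((Char.ofNat (c.toNat + 32)) == '(') = false from beq_eq_false_iff_ne.mpr h2,
        show ((Char.ofNat (c.toNat + 32)) == ':') = false from beq_eq_false_iff_ne.mpr h3,
        show (c == ' ') = false from beq_eq_false_iff_ne.mpr g1,
        show (c == '(') = false from beq_eq_false_iff_ne.mpr g2,
        show (c == ':') = false from beq_eq_false_iff_ne.mpr g3]
  · rfl

theorem pvToken_lower (l : List Char) :
    pvToken (PySem.Chars.lower l) = PySem.Chars.lower (pvToken l) := by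
  induction l with
  | nil => rfl
  | cons c cs ih =>
    simp only [PySem.Chars.lower, List.map_cons, pvToken] at *
    have := pvSep_lowerChar c
    simp only [pvSep] at this
    rw [this]
    by_cases h : (c == ' ' || c == '(' || c == ':') = true
    · simp [h]
    · simp only [Bool.not_eq_true] at h
      simp [h, ih]

theorem pvTok_iff (kw : List Char) (h : kw.all (fun c => !pvSep c) = true) (m : List Char) :
    pvToken m = kw ↔
      (kw <+: m ∧ (m.length = kw.length ∨ (m[kw.length]?.any pvSep) = true)) := by
  induction kw generalizing m with
  | nil =>
    cases m with
    | nil => simp [pvToken]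
    | cons c cs =>
      simp only [pvToken, List.nil_prefix, true_and, List.length_cons, List.length_nil,
        List.getElem?_cons_zero, Option.any_some]
      constructor
      · intro he
        by_cases hs : (c == ' ' || c == '(' || c == ':') = true
        · right; simpa [pvSep] using hs
        · simp [hs] at he
      · rintro (he | hs)
        · omega
        · simp only [pvSep] at hs; simp [hs]
  | cons k kt ih =>
    have hk : pvSep k = false := by
      simp only [List.all_cons, Bool.and_eq_true, Bool.not_eq_true'] at h; exact h.1
    have hkt : kt.all (fun c => !pvSep c) = true := by
      simp only [List.all_cons, Bool.and_eq_true] at h; exact h.2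
    cases m with
    | nil => simp [pvToken]
    | cons c cs =>
      by_cases hck : c = k
      · subst hck
        simp only [pvToken, List.cons_prefix_cons, true_and, List.length_cons,
          Nat.add_right_cancel_iff, List.getElem?_cons_succ]
        have hks : (c == ' ' || c == '(' || c == ':') = false := by
          simpa [pvSep] using hk
        rw [hks]
        simp only [Bool.false_eq_true, if_false, List.cons.injEq, true_and]
        exact ih hkt cs
      · constructor
        · intro he
          exfalso
          simp only [pvToken] at he
          by_cases hs : (c == ' ' || c == '(' || c == ':') = true
          · simp [hs] at he
          · simp [hs] at he; exact hck he.1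
        · rintro ⟨hp, -⟩
          exact (hck ((List.cons_prefix_cons.mp hp).1).symm).elim

theorem pvAny_map_lower (l : List Char) (k : Nat) :
    ((PySem.Chars.lower l)[k]?.any pvSep) = (l[k]?.any pvSep) := by
  simp only [PySem.Chars.lower, List.getElem?_map]
  cases l[k]? with
  | none => rfl
  | some c => simp [pvSep_lowerChar c]

-- A's per-keyword test equals 'the leading token of the lowered stripped line is kw'
theorem pvCond_eq (l : List Char) (kw : String)
    (h : kw.toList.all (fun c => !pvSep c) = true) :
    (PySem.Chars.startswith (PySem.Chars.lower l) kw.toList &&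
      (decide (l.length = kw.toList.length) ||
        (l[kw.toList.length]?.any pvSep))) =
    decide (pvToken (PySem.Chars.lower l) = kw.toList) := by
  rw [← pvAny_map_lower l kw.toList.length]
  have hlen : (PySem.Chars.lower l).length = l.length := by
    simp [PySem.Chars.lower]
  by_cases heq : pvToken (PySem.Chars.lower l) = kw.toList
  · rw [decide_eq_true heq]
    obtain ⟨hp, hrest⟩ := (pvTok_iff kw.toList h (PySem.Chars.lower l)).mp heq
    rw [(PySem.Chars.startswith_iff _ _).mpr hp]
    rcases hrest with he | hs
    · have : decide (l.length = kw.toList.length) = true := by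
        simp only [decide_eq_true_eq]; omega
      rw [this]; simp
    · rw [hs]; simp
  · rw [decide_eq_false heq]
    rw [(pvTok_iff kw.toList h (PySem.Chars.lower l)).not] at heq
    push Not at heq
    by_cases hp : kw.toList <+: PySem.Chars.lower l
    · have hng := heq hp
      have h1 : decide (l.length = kw.toList.length) = false := by
        simp only [decide_eq_false_iff_not]
        intro he; exact hng.1 (by omega)
      have h2 : ((PySem.Chars.lower l)[kw.toList.length]?.any pvSep) = false := by
        cases hb : ((PySem.Chars.lower l)[kw.toList.length]?.any pvSep)
        · rfl
        · exact absurd hb hng.2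
      rw [h1, h2]
      simp
    · rw [(Bool.eq_false_iff).mpr (fun hb => hp ((PySem.Chars.startswith_iff _ _).mp hb))]
      simp

-- ===== VERDICT (by name: the statement is the Claim_ definition above) =====
theorem is_block_opener_py_spec : Claim_equal_is_block_opener_py := by
  intro line _
  unfold Spec_is_block_opener_py
  unfold is_block_opener_py is_block_opener_py_alt
  simp only [PySem.Str.startswith_eq, PySem.Str.len_eq, PySem.Str.pyGet?_eq,
    PySem.Str.toList_lower, PySem.Str.toList_lstrip]
  set l := PySem.Chars.lstrip line.toList with hl
  have hconv : ∀ kw : String, kw.toList.all (fun c => !pvSep c) = true →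
      (PySem.Chars.startswith (PySem.Chars.lower l) kw.toList &&
        (((l.length : Int) == (kw.toList.length : Int)) ||
          ((PySem.Chars.pyGet? l (kw.toList.length : Int)).any
            (fun c => c == ' ' || c == '(' || c == ':')))) =
      decide (pvToken (PySem.Chars.lower l) = kw.toList) := by
    intro kw hkw
    have h2 : PySem.Chars.pyGet? l (kw.toList.length : Int) = l[kw.toList.length]? := by
      simp
    have h1 : (((l.length : Int) == (kw.toList.length : Int)))
        = decide (l.length = kw.toList.length) := by
      by_cases hh : l.length = kw.toList.length
      · rw [hh]; simp
      · rw [beq_eq_false_iff_ne.mpr (by exact_mod_cast hh), decide_eq_false hh]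
    rw [h2, h1, show (fun c => c == ' ' || c == '(' || c == ':') = pvSep from rfl,
      pvCond_eq l kw hkw]
  rw [← pvToken_lower]
  simp only [BLOCK_KEYWORDS, pvKeywordSet, List.any_cons, List.any_nil, List.map_cons,
    List.map_nil]
  rw [hconv "def" (by decide), hconv "class" (by decide), hconv "if" (by decide),
    hconv "elif" (by decide), hconv "else" (by decide), hconv "while" (by decide),
    hconv "for" (by decide), hconv "with" (by decide), hconv "try" (by decide),
    hconv "except" (by decide), hconv "finally" (by decide)]
  set t := pvToken (PySem.Chars.lower l) with ht
  rw [PySem.Set.contains, List.contains_eq_mem]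
  simp [PySem.Set.mem_ofList, List.mem_cons, Bool.or_false]
  rfl
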